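-- pv_equiv track=rewrite | github.com/teo000/PythonLabs | Lab2/main.py | spec_cant_see
-- ===== SOURCE A (Python) =====
-- def spec_cant_see(matrix):
--     result = []
--     for j in range(0, len(matrix[0])):
--         tallest_spec = matrix[0][j]
--         for i in range(1, len(matrix)):
--             if matrix[i][j] < tallest_spec:
--                 result.append((i, j))
--             elif matrix[i][j] > tallest_spec:
--                 tallest_spec = matrix[i][j]
--     return result
-- ===== SOURCE B (Python) =====
-- def spec_cant_see(matrix):
--     result = []
--     n = len(matrix)
--     for j in range(len(matrix[0])):
--         col = [matrix[i][j] for i in range(n)]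
--         cur = col[0]
--         maxes = []
--         for v in col:
--             cur = max(cur, v)
--             maxes.append(cur)
--         for i in range(1, n):
--             if col[i] < maxes[i - 1]:
--                 result.append((i, j))
--     return result
-- ===== Notes on version B (the rewrite author's own statement) =====
-- stated objective: alternative
-- what changed: Instead of interleaving a running column maximum with the comparison in one stateful pass, B first materialises each column and its prefix-maxima table in separate passes and then compares col[i] against maxes[i-1] in a stateless scan.
import Mathlib
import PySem

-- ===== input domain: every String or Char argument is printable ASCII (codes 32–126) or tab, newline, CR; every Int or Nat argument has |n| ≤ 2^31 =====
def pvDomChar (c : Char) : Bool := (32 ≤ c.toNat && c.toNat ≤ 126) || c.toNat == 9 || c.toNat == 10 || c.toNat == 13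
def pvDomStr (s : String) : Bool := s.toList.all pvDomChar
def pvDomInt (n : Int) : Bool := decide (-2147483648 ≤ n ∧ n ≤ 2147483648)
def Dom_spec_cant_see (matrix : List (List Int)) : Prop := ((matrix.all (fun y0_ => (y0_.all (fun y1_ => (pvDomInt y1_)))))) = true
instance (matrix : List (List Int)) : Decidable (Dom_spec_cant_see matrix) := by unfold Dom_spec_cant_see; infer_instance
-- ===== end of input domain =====

-- B replaces A's interleaved running-maximum state with a per-column prefix-maxima
-- table built in a separate pass (objective: alternative decomposition, same cost).

-- ===== PORT A =====
def spec_cant_see (matrix : List (List Int)) : List (Int × Int) :=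
  (PySem.List.pyRange 0 ((PySem.List.pyGetD matrix 0 []).length : Int) 1).foldl
    (fun result j =>
      ((PySem.List.pyRange 1 (matrix.length : Int) 1).foldl
        (fun (st : Int × List (Int × Int)) i =>
          if PySem.List.pyGetD (PySem.List.pyGetD matrix i []) j 0 < st.1 then
            (st.1, st.2 ++ [(i, j)])
          else if PySem.List.pyGetD (PySem.List.pyGetD matrix i []) j 0 > st.1 then
            (PySem.List.pyGetD (PySem.List.pyGetD matrix i []) j 0, st.2)
          else st)
        (PySem.List.pyGetD (PySem.List.pyGetD matrix 0 []) j 0, result)).2)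
    []

-- ===== PORT B =====
def spec_cant_see_alt (matrix : List (List Int)) : List (Int × Int) :=
  let n : Int := matrix.length
  (PySem.List.pyRange 0 ((PySem.List.pyGetD matrix 0 []).length : Int) 1).foldl
    (fun result j =>
      let col := (PySem.List.pyRange 0 n 1).map
        (fun i => PySem.List.pyGetD (PySem.List.pyGetD matrix i []) j 0)
      let maxes := (col.foldl
        (fun (st : Int × List Int) v => (max st.1 v, st.2 ++ [max st.1 v]))
        (PySem.List.pyGetD col 0 0, [])).2
      (PySem.List.pyRange 1 n 1).foldl
        (fun res i =>
          if PySem.List.pyGetD col i 0 < PySem.List.pyGetD maxes (i - 1) 0 then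
            res ++ [(i, j)]
          else res)
        result)
    []

-- ===== PRECONDITION & SPEC =====
-- Pre_ excludes exactly the inputs on which the Python A raises IndexError:
-- the empty matrix (matrix[0]) and matrices with a row shorter than row 0.
def Pre_spec_cant_see (matrix : List (List Int)) : Prop :=
  matrix ≠ [] ∧ ∀ row ∈ matrix, (matrix.headD []).length ≤ row.length
instance (matrix : List (List Int)) : Decidable (Pre_spec_cant_see matrix) := by
  unfold Pre_spec_cant_see; infer_instance

def pvWitness_spec_cant_see : List (List Int) := [[1, 2], [0, 3]]

def Spec_spec_cant_see (matrix : List (List Int)) (out : List (Int × Int)) : Prop := out = spec_cant_see_alt matrix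
instance (matrix : List (List Int)) (out : List (Int × Int)) : Decidable (Spec_spec_cant_see matrix out) := by unfold Spec_spec_cant_see; infer_instance

-- ===== CLAIM (what is proved, stated in full; the proofs are below) =====
def Claim_equal_spec_cant_see : Prop := ∀ (matrix : List (List Int)), Dom_spec_cant_see matrix → Pre_spec_cant_see matrix → Spec_spec_cant_see matrix (spec_cant_see matrix)

-- ===== LEMMAS AND PROOFS =====

-- proof-side characterisation of B's prefix-maxima loop
def pvPrefixAux (cur : Int) : List Int → List Int
  | [] => []
  | v :: l => (max cur v) :: pvPrefixAux (max cur v) l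

theorem pvPrefixAux_fold (l : List Int) : ∀ (cur : Int) (out : List Int),
    (l.foldl (fun (st : Int × List Int) v => (max st.1 v, st.2 ++ [max st.1 v]))
      (cur, out)).2 = out ++ pvPrefixAux cur l := by
  induction l with
  | nil => intro cur out; simp [pvPrefixAux]
  | cons v l ih =>
      intro cur out
      simp only [List.foldl_cons, pvPrefixAux]
      rw [ih]
      simp

theorem pvPrefixAux_length (l : List Int) : ∀ cur, (pvPrefixAux cur l).length = l.length := by
  induction l with
  | nil => intro cur; rfl
  | cons v l ih => intro cur; simp [pvPrefixAux, ih]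

theorem pvPrefixAux_getD_succ (l : List Int) : ∀ (cur : Int) (k : Nat), k + 1 < l.length →
    (pvPrefixAux cur l).getD (k + 1) 0
      = max ((pvPrefixAux cur l).getD k 0) (l.getD (k + 1) 0) := by
  induction l with
  | nil => intro cur k h; simp at h
  | cons v l ih =>
      intro cur k h
      cases k with
      | zero =>
          cases l with
          | nil => simp at h
          | cons w l' => simp [pvPrefixAux]
      | succ k' =>
          simp only [pvPrefixAux, List.getD_cons_succ]
          exact ih (max cur v) k' (by simpa using h)

-- A's inner loop with running maximum T equals B's table-driven scan, provided
-- T is the prefix maximum M (a-1) and M satisfies the prefix-max recurrence.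
theorem pv_inner_eq (g M : Int → Int) (n : Int) (j : Int)
    (HM : ∀ i : Int, 1 ≤ i → i < n → M i = max (M (i - 1)) (g i)) :
    ∀ (k : Nat) (a T : Int) (res : List (Int × Int)), (n - a).toNat = k → 1 ≤ a → T = M (a - 1) →
    ((PySem.List.pyRange a n 1).foldl
        (fun (st : Int × List (Int × Int)) i =>
          if g i < st.1 then (st.1, st.2 ++ [(i, j)])
          else if g i > st.1 then (g i, st.2)
          else st)
        (T, res)).2
      = (PySem.List.pyRange a n 1).foldl
          (fun res i => if g i < M (i - 1) then res ++ [(i, j)] else res) res := by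
  intro k
  induction k with
  | zero =>
      intro a T res hk _ _
      rw [PySem.List.pyRange_one_eq_nil (by omega)]
      rfl
  | succ k ih =>
      intro a T res hk ha hT
      have han : a < n := by omega
      subst hT
      rw [PySem.List.pyRange_one_cons han]
      simp only [List.foldl_cons]
      have hMa : M a = max (M (a - 1)) (g a) := HM a ha han
      by_cases h1 : g a < M (a - 1)
      · simp only [if_pos h1]
        exact ih (a + 1) (M (a - 1)) (res ++ [(a, j)]) (by omega) (by omega)
          (by rw [Int.add_sub_cancel, hMa, max_eq_left h1.le])
      · simp only [if_neg h1]
        by_cases h2 : g a > M (a - 1)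
        · simp only [if_pos h2]
          exact ih (a + 1) (g a) res (by omega) (by omega)
            (by rw [Int.add_sub_cancel, hMa, max_eq_right h2.le])
        · simp only [if_neg h2]
          exact ih (a + 1) (M (a - 1)) res (by omega) (by omega)
            (by rw [Int.add_sub_cancel, hMa]; omega)

theorem spec_cant_see_spec_aux : ∀ (matrix : List (List Int)), Pre_spec_cant_see matrix →
    spec_cant_see matrix = spec_cant_see_alt matrix := by
  intro matrix hpre
  obtain ⟨hne, -⟩ := hpre
  have hn1 : 1 ≤ (matrix.length : Int) := by
    have : 0 < matrix.length := List.length_pos_of_ne_nil hne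
    omega
  unfold spec_cant_see spec_cant_see_alt
  apply PySem.List.foldl_congr_mem
  intro res j hj
  dsimp only
  -- per-column equality
  set n : Int := (matrix.length : Int) with hn
  set g : Int → Int := fun i => PySem.List.pyGetD (PySem.List.pyGetD matrix i []) j 0 with hg
  set col : List Int := (PySem.List.pyRange 0 n 1).map g with hcol
  have hcollen : col.length = matrix.length := by
    simp [hcol, PySem.List.length_pyRange_one, hn]
  -- B's maxes loop produces the prefix-maxima table
  set c0 : Int := PySem.List.pyGetD col 0 0 with hc0
  set maxes : List Int := pvPrefixAux c0 col with hmaxes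
  rw [pvPrefixAux_fold col c0 []]
  simp only [List.nil_append, ← hmaxes]
  -- col is nonempty, headed by g 0
  have hcons : col = g 0 :: (PySem.List.pyRange 1 n 1).map g := by
    rw [hcol, PySem.List.pyRange_one_cons (by omega), List.map_cons]
    norm_num
  have hc0val : c0 = g 0 := by
    rw [hc0, hcons, PySem.List.pyGetD_zero_cons]
  -- the abstract prefix-max function
  set M : Int → Int := fun i => PySem.List.pyGetD maxes i 0 with hM
  have hmaxlen : maxes.length = matrix.length := by
    rw [hmaxes, pvPrefixAux_length, hcollen]
  have hcolget : ∀ i : Int, 0 ≤ i → i < n → PySem.List.pyGetD col i 0 = g i := by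
    intro i h0 hlt
    rw [hcol]
    exact PySem.List.pyGetD_map_pyRange_of_nonneg g n i 0 h0 hlt
  have HM : ∀ i : Int, 1 ≤ i → i < n → M i = max (M (i - 1)) (g i) := by
    intro i h1 hlt
    obtain ⟨k, hk⟩ : ∃ k : Nat, i = ((k : Int) + 1) := ⟨(i - 1).toNat, by omega⟩
    have hkb : k + 1 < maxes.length := by
      rw [hmaxlen]; omega
    have e1 : M i = maxes.getD (k + 1) 0 := by
      simp only [hM, hk]
      have h : ((k : Int) + 1) = ((k + 1 : Nat) : Int) := by push_cast; ring
      rw [h, PySem.List.pyGetD_natCast]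
    have e2 : M (i - 1) = maxes.getD k 0 := by
      simp only [hM, hk]
      rw [Int.add_sub_cancel, PySem.List.pyGetD_natCast]
    have e3 : g i = col.getD (k + 1) 0 := by
      rw [← hcolget i (by omega) hlt, hk]
      have h : ((k : Int) + 1) = ((k + 1 : Nat) : Int) := by push_cast; ring
      rw [h, PySem.List.pyGetD_natCast]
    rw [e1, e2, e3, hmaxes]
    exact pvPrefixAux_getD_succ col c0 k (by rw [hcollen]; rw [hmaxlen] at hkb; omega)
  have hM0 : M 0 = g 0 := by
    simp only [hM]
    rw [hmaxes, hcons, hc0val]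
    simp [pvPrefixAux, PySem.List.pyGetD_zero_cons]
  -- rewrite B's scan so its body mentions g instead of col lookups
  have hBcongr :
      (PySem.List.pyRange 1 n 1).foldl
        (fun res i =>
          if PySem.List.pyGetD col i 0 < PySem.List.pyGetD maxes (i - 1) 0 then
            res ++ [(i, j)] else res) res
      = (PySem.List.pyRange 1 n 1).foldl
          (fun res i => if g i < M (i - 1) then res ++ [(i, j)] else res) res := by
    apply PySem.List.foldl_congr_mem
    intro acc i hi
    rw [PySem.List.mem_pyRange_one] at hi
    rw [hcolget i (by omega) hi.2]
  rw [hBcongr]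
  have hT0 : g 0 = M (1 - 1) := by norm_num [hM0]
  exact pv_inner_eq g M n j HM (n - 1).toNat 1 (g 0) res (by omega) le_rfl hT0

-- ===== VERDICT (by name: the statement is the Claim_ definition above) =====
theorem spec_cant_see_spec : Claim_equal_spec_cant_see := by
  intro matrix _ hpre
  unfold Spec_spec_cant_see
  exact spec_cant_see_spec_aux matrix hpre
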